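-- pv_equiv track=rewrite | github.com/ParmpalSinghGill/TweetBot | TweetClassification.py | combineCapitalSingle
-- ===== SOURCE A (Python) =====
-- def combineCapitalSingle(words):
-- 	combinedWords=[]
-- 	comword=""
-- 	for word in words:
-- 		if len(word)>1 or (len(word)==1 and not 65<=ord(word)<=90 and not 48<=ord(word)<=57 ) :
-- 			if len(comword)>0:
-- 				combinedWords.append(comword)
-- 				comword=""
-- 			combinedWords.append(word)
-- 		else:
-- 			comword+=word
-- 	if len(comword) > 0:
-- 		combinedWords.append(comword)
-- 	return combinedWords
-- ===== SOURCE B (Python) =====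
-- def combineCapitalSingle(words):
-- 	# Run-grouping re-implementation: group maximal runs of accumulable tokens
-- 	# (empty strings and single capital/digit chars) with a forward scan and
-- 	# join each run at once, instead of threading a mutable accumulator string.
-- 	def is_acc(w):
-- 		return len(w) == 0 or (len(w) == 1 and ('A' <= w <= 'Z' or '0' <= w <= '9'))
-- 	res = []
-- 	i, n = 0, len(words)
-- 	while i < n:
-- 		if is_acc(words[i]):
-- 			j = i
-- 			while j < n and is_acc(words[j]):
-- 				j += 1
-- 			joined = "".join(words[i:j])
-- 			if joined:
-- 				res.append(joined)
-- 			i = j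
-- 		else:
-- 			res.append(words[i])
-- 			i += 1
-- 	return res
-- ===== Notes on version B (the rewrite author's own statement) =====
-- stated objective: idiomatic
-- what changed: Replaces the mutable comword accumulator threaded through a single for-loop with a two-pointer run-grouping scan: each maximal run of accumulable tokens (empty strings or single capital/digit characters) is located, joined in one step, and appended if non-empty.
import Mathlib
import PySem

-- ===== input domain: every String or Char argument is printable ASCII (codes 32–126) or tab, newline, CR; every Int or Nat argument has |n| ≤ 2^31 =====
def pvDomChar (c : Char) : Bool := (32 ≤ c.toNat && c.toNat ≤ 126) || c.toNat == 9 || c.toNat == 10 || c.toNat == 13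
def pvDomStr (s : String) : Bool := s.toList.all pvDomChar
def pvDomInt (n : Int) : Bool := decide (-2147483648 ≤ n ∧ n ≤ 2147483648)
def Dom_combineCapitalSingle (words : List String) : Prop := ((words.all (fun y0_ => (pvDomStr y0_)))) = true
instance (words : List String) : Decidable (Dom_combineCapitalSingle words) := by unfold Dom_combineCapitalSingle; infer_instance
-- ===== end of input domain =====

-- B replaces A's threaded comword accumulator with a two-pointer run-grouping scan
-- (join each maximal run of accumulable tokens at once); same output, same cost.


-- ===== PORT A =====
-- emit condition: len(word)>1 or (len(word)==1 and not 65<=ord(word)<=90 and not 48<=ord(word)<=57)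
def emitA (w : String) : Bool :=
  let l := w.toList
  decide (1 < l.length ∨ (l.length = 1 ∧
    ¬(65 ≤ (l.headD 'a').toNat ∧ (l.headD 'a').toNat ≤ 90) ∧
    ¬(48 ≤ (l.headD 'a').toNat ∧ (l.headD 'a').toNat ≤ 57)))

-- comword is kept as a List Char (Python string concatenation = list append)
def stepA (st : List String × List Char) (w : String) : List String × List Char :=
  if emitA w then
    if st.2.length > 0 then (st.1 ++ [String.ofList st.2] ++ [w], ([] : List Char))
    else (st.1 ++ [w], st.2)
  else (st.1, st.2 ++ w.toList)

def combineCapitalSingle (words : List String) : List String :=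
  let st := words.foldl stepA (([] : List String), ([] : List Char))
  if st.2.length > 0 then st.1 ++ [String.ofList st.2] else st.1

-- ===== PORT B =====
-- is_acc(w): empty string or single capital/digit character ('A'<=w<='Z' etc. compared by code)
def isAccB (w : String) : Bool :=
  match w.toList with
  | [] => true
  | [c] => decide ((65 ≤ c.toNat ∧ c.toNat ≤ 90) ∨ (48 ≤ c.toNat ∧ c.toNat ≤ 57))
  | _ => false

-- run-grouping scan: take the maximal accumulable run, join it ("".join = char-list concat), recurse on the rest
def combineCapitalSingle_alt : List String → List String
  | [] => []
  | w :: ws =>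
    if isAccB w then
      let joined := String.ofList ((w :: ws.takeWhile isAccB).flatMap String.toList)
      let rest := combineCapitalSingle_alt (ws.dropWhile isAccB)
      if joined.toList.length > 0 then joined :: rest else rest
    else w :: combineCapitalSingle_alt ws
termination_by l => l.length
decreasing_by
  · exact Nat.lt_succ_of_le (ws.length_dropWhile_le _)
  · simp

-- ===== PRECONDITION & SPEC =====
def Spec_combineCapitalSingle (words : List String) (out : List String) : Prop := out = combineCapitalSingle_alt words
instance (words : List String) (out : List String) : Decidable (Spec_combineCapitalSingle words out) := by unfold Spec_combineCapitalSingle; infer_instance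

-- ===== CLAIM (what is proved, stated in full; the proofs are below) =====
def Claim_equal_combineCapitalSingle : Prop := ∀ (words : List String), Dom_combineCapitalSingle words → Spec_combineCapitalSingle words (combineCapitalSingle words)

-- ===== LEMMAS AND PROOFS =====

-- A's remaining output given pending accumulator `com`
def runA (com : List Char) : List String → List String
  | [] => if com.length > 0 then [String.ofList com] else []
  | w :: ws =>
    if emitA w then
      (if com.length > 0 then [String.ofList com, w] else [w]) ++ runA [] ws
    else runA (com ++ w.toList) ws

theorem foldA_eq (ws : List String) (acc : List String) (com : List Char) :
    (let st := ws.foldl stepA (acc, com);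
     if st.2.length > 0 then st.1 ++ [String.ofList st.2] else st.1) = acc ++ runA com ws := by
  induction ws generalizing acc com with
  | nil =>
    simp only [List.foldl_nil, runA]
    split <;> simp
  | cons w ws ih =>
    simp only [List.foldl_cons, runA, stepA]
    by_cases he : emitA w
    · simp only [he, if_pos]
      by_cases hc : com.length > 0
      · simp only [hc, if_pos, ih]
        simp
      · simp only [hc, ih]
        have : com = [] := by
          cases com with
          | nil => rfl
          | cons a l => simp at hc
        subst this
        simp
    · simp only [he, if_neg, Bool.not_eq_true] at *
      simp only [ih]

theorem isAcc_not_emit (w : String) : isAccB w = !emitA w := by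
  rcases h : w.toList with _ | ⟨c, _ | ⟨d, t⟩⟩
  · simp [isAccB, emitA, h]
  · simp only [isAccB, emitA, h]
    by_cases hc : (65 ≤ c.toNat ∧ c.toNat ≤ 90) ∨ (48 ≤ c.toNat ∧ c.toNat ≤ 57) <;> simp [hc] <;> omega
  · simp [isAccB, emitA, h]

-- B's remaining output given pending accumulator `com` (run-grouping form)
def bpre (com : List Char) (ws : List String) : List String :=
  let j := com ++ (ws.takeWhile isAccB).flatMap String.toList
  (if j.length > 0 then [String.ofList j] else []) ++ combineCapitalSingle_alt (ws.dropWhile isAccB)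

theorem alt_eq_bpre (ws : List String) : combineCapitalSingle_alt ws = bpre [] ws := by
  cases ws with
  | nil => simp [bpre, combineCapitalSingle_alt]
  | cons w ws =>
    by_cases h : isAccB w
    · rw [combineCapitalSingle_alt]
      simp only [h, if_pos, bpre, List.takeWhile_cons_of_pos, List.dropWhile_cons_of_pos,
        List.flatMap_cons, List.nil_append, String.toList_ofList]
      split <;> simp_all
    · have hb : isAccB w = false := by simpa using h
      simp [bpre, hb]

theorem runA_eq_bpre (ws : List String) (com : List Char) : runA com ws = bpre com ws := by
  induction ws generalizing com with
  | nil => simp [runA, bpre, combineCapitalSingle_alt]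
  | cons w ws ih =>
    by_cases h : isAccB w
    · have he : emitA w = false := by
        have := isAcc_not_emit w; rw [h] at this; simpa using this.symm
      rw [runA]
      simp only [he, Bool.false_eq_true, if_neg, not_false_eq_true, ih]
      simp [bpre, h, List.append_assoc]
    · have hb : isAccB w = false := by simpa using h
      have he : emitA w = true := by
        have := isAcc_not_emit w; rw [hb] at this
        simpa using this.symm
      rw [runA]
      simp only [he, if_pos, ih, ← alt_eq_bpre ws]
      have hcons : combineCapitalSingle_alt (w :: ws) = w :: combineCapitalSingle_alt ws := by
        rw [combineCapitalSingle_alt]; simp [hb]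
      simp [bpre, hb, hcons]
      by_cases hl : com.length > 0
      · simp [hl]
      · have : com = [] := by cases com <;> simp_all
        subst this; simp

-- ===== VERDICT (by name: the statement is the Claim_ definition above) =====
theorem combineCapitalSingle_spec : Claim_equal_combineCapitalSingle := by
  intro words _
  unfold Spec_combineCapitalSingle combineCapitalSingle
  rw [foldA_eq words [] [], runA_eq_bpre, ← alt_eq_bpre]
  simp
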